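-- pv_equiv track=rewrite | github.com/obb777/KataCode | python/Simplifying multilinear polynomials/solution.py | split_before
-- ===== SOURCE A (Python) =====
-- def split_before (strng, delims):
--     splitted = []
--     split_item = ''
--     for c in strng:
--         if c in delims and len(split_item) > 0:
--             splitted.append(split_item)
--             split_item = ''
--         split_item += c
--     splitted.append(split_item)
--     return splitted
-- ===== SOURCE B (Python) =====
-- def split_before(strng, delims):
--     # Two-pointer slicing: each piece is the char at i plus the run of
--     # non-delimiter chars after it; slice it out whole and jump i to j.
--     if not strng:
--         return ['']
--     out = []
--     i, n = 0, len(strng)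
--     while i < n:
--         j = i + 1
--         while j < n and strng[j] not in delims:
--             j += 1
--         out.append(strng[i:j])
--         i = j
--     return out
-- ===== Notes on version B (the rewrite author's own statement) =====
-- stated objective: alternative
-- what changed: B replaces A's single fold with a character accumulator (append char by char, flush the piece when a delimiter is met) by a two-pointer scan that finds the next delimiter position and slices a whole piece out at a time.
import Mathlib
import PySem

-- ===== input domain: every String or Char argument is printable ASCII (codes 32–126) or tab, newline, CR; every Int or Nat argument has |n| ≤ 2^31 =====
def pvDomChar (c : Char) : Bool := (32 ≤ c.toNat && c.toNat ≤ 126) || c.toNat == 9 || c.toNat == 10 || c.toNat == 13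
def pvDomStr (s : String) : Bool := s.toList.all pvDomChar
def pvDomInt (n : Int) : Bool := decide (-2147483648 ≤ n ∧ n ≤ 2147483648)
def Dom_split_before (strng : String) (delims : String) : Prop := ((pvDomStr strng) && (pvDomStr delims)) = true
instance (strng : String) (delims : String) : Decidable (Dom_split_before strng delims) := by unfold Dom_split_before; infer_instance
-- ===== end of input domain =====

-- B replaces A's accumulator fold (append char by char, flush on delimiter) by a
-- two-pointer scan that slices out one whole piece at a time; objective: alternative.
-- Both ports work over List Char (exact: Python 'c in delims' on a 1-char c is char membership).

-- ===== PORT A =====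
-- one loop step: 'if c in delims and len(split_item) > 0: append, reset; split_item += c'
def pvStepA (ds : List Char) (acc : List (List Char) × List Char) (c : Char) :
    List (List Char) × List Char :=
  if ds.contains c && acc.2.length > 0 then (acc.1 ++ [acc.2], [c]) else (acc.1, acc.2 ++ [c])

def split_before (strng : String) (delims : String) : List String :=
  ((strng.toList.foldl (pvStepA delims.toList) ([], [])).1
    ++ [(strng.toList.foldl (pvStepA delims.toList) ([], [])).2]).map String.ofList

-- ===== PORT B =====
-- the 'while i < len(rest) and rest[i] not in delims: i += 1' loop of Source B
def pvSpanB (ds : List Char) : List Char → Nat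
  | [] => 0
  | c :: cs => if ds.contains c then 0 else pvSpanB ds cs + 1

-- Source B's outer while loop: one recursive step per piece, on the remaining suffix
def pvSplitB (ds : List Char) : List Char → List (List Char)
  | [] => [[]]
  | c :: cs =>
    let i := pvSpanB ds cs
    let piece := c :: cs.take i
    let tail := cs.drop i
    if tail = [] then [piece] else piece :: pvSplitB ds tail
  termination_by l => l.length
  decreasing_by
    simp only [List.length_drop, List.length_cons]
    omega

def split_before_alt (strng : String) (delims : String) : List String :=
  (pvSplitB delims.toList strng.toList).map String.ofList

-- ===== PRECONDITION & SPEC =====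
def Spec_split_before (strng : String) (delims : String) (out : List String) : Prop := out = split_before_alt strng delims
instance (strng : String) (delims : String) (out : List String) : Decidable (Spec_split_before strng delims out) := by unfold Spec_split_before; infer_instance

-- ===== CLAIM (what is proved, stated in full; the proofs are below) =====
def Claim_equal_split_before : Prop := ∀ (strng : String) (delims : String), Dom_split_before strng delims → Spec_split_before strng delims (split_before strng delims)

-- ===== LEMMAS AND PROOFS =====

-- canonical chunk list both ports are reduced to
def pvChunks (ds : List Char) : List Char → List (List Char)
  | [] => []
  | c :: cs =>
      (c :: cs.takeWhile (fun x => !ds.contains x)) ::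
        pvChunks ds (cs.dropWhile (fun x => !ds.contains x))
  termination_by l => l.length
  decreasing_by
    have := List.length_dropWhile_le (fun x => !ds.contains x) cs
    simp only [List.length_cons]; omega

theorem pvSpanB_take (ds : List Char) :
    ∀ l : List Char, l.take (pvSpanB ds l) = l.takeWhile (fun x => !ds.contains x)
  | [] => rfl
  | c :: cs => by
      by_cases h : c ∈ ds <;>
        simp [pvSpanB, h, pvSpanB_take ds cs]

theorem pvSpanB_drop (ds : List Char) :
    ∀ l : List Char, l.drop (pvSpanB ds l) = l.dropWhile (fun x => !ds.contains x)
  | [] => rfl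
  | c :: cs => by
      by_cases h : c ∈ ds <;>
        simp [pvSpanB, h, pvSpanB_drop ds cs]

-- B's recursion computes one chunk then the rest
theorem pvSplitB_cons (ds : List Char) : ∀ (c : Char) (cs : List Char),
    pvSplitB ds (c :: cs) =
      (c :: cs.takeWhile (fun x => !ds.contains x)) ::
        pvChunks ds (cs.dropWhile (fun x => !ds.contains x))
  | c, cs => by
      rw [pvSplitB]
      simp only [pvSpanB_take, pvSpanB_drop]
      by_cases h : cs.dropWhile (fun x => !ds.contains x) = []
      · rw [if_pos h, h, pvChunks]
      · obtain ⟨d, ts, hd⟩ := List.exists_cons_of_ne_nil h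
        have hlen : ts.length < cs.length := by
          have := List.length_dropWhile_le (fun x => !ds.contains x) cs
          rw [hd] at this; simp at this; omega
        rw [if_neg h, hd, pvSplitB_cons ds d ts]
        conv_rhs => rw [pvChunks]
  termination_by _ cs => cs.length

-- A's fold, once the current piece is nonempty, appends one chunk and continues
theorem pvFoldA_chunks (ds : List Char) : ∀ (cs : List Char) (splitted : List (List Char))
    (item : List Char), item ≠ [] →
    (cs.foldl (pvStepA ds) (splitted, item)).1 ++ [(cs.foldl (pvStepA ds) (splitted, item)).2]
      = splitted ++ (item ++ cs.takeWhile (fun x => !ds.contains x)) ::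
          pvChunks ds (cs.dropWhile (fun x => !ds.contains x)) := by
  intro cs
  induction cs with
  | nil => intro splitted item h; simp [pvChunks]
  | cons c cs ih =>
    intro splitted item h
    simp only [List.foldl_cons]
    by_cases hc : c ∈ ds
    · have hstep : pvStepA ds (splitted, item) c = (splitted ++ [item], [c]) := by
        simp [pvStepA, hc, List.length_pos_iff.mpr h]
      rw [hstep, ih (splitted ++ [item]) [c] (by simp)]
      simp [hc, pvChunks]
    · have hstep : pvStepA ds (splitted, item) c = (splitted, item ++ [c]) := by
        simp [pvStepA, hc]
      rw [hstep, ih splitted (item ++ [c]) (by simp)]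
      simp [hc]

theorem pv_main (ds : List Char) (l : List Char) :
    (l.foldl (pvStepA ds) ([], [])).1 ++ [(l.foldl (pvStepA ds) ([], [])).2]
      = pvSplitB ds l := by
  cases l with
  | nil => simp [pvSplitB]
  | cons c cs =>
    simp only [List.foldl_cons]
    have hstep : pvStepA ds (([] : List (List Char)), ([] : List Char)) c = ([], [c]) := by
      simp [pvStepA]
    rw [hstep, pvFoldA_chunks ds cs [] [c] (by simp), pvSplitB_cons]
    simp

-- ===== VERDICT (by name: the statement is the Claim_ definition above) =====
theorem split_before_spec : Claim_equal_split_before := by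
  intro strng delims _
  unfold Spec_split_before split_before split_before_alt
  rw [pv_main]
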